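-- pv_equiv track=rewrite | github.com/amrheing/homeassistant-entity-renamer | homeassistant-entity-renamer.py | align_strings
-- ===== SOURCE A (Python) =====
-- def align_strings(table):
--     alignment_char = "."
--
--     if len(table) == 0:
--         return
--
--     for column in range(len(table[0])):
--         # Get the column data from the table
--         column_data = [row[column] for row in table]
--
--         # Find the maximum length of the first part of the split strings
--         strings_to_align = [s for s in column_data if alignment_char in s]
--         if len(strings_to_align) == 0:
--             continue
--
--         max_length = max([len(s.split(alignment_char)[0]) for s in strings_to_align])
--
--         def align_string(s):
--             s_split = s.split(alignment_char, maxsplit=1)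
--             if len(s_split) == 1:
--                 return s
--             else:
--                 return f"{s_split[0]:>{max_length}}.{s_split[1]}"
--
--         # Create the modified table by replacing the column with aligned strings
--         table = [
--             tuple(align_string(value) if i == column else value for i, value in enumerate(row))
--             for row in table
--         ]
--
--     return table
-- ===== SOURCE B (Python) =====
-- def _aligned(cell, width):
--     parts = cell.split(".", 1)
--     if len(parts) == 2:
--         return parts[0].rjust(width) + "." + parts[1]
--     return cell
--
--
-- def align_strings(table):
--     if len(table) == 0:
--         return None
--     ncols = len(table[0])
--     col_max = []
--     for c in range(ncols):
--         widths = [len(row[c].split(".")[0]) for row in table if "." in row[c]]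
--         col_max.append(max(widths) if widths else None)
--     return [
--         tuple(
--             _aligned(cell, col_max[i]) if i < ncols and col_max[i] is not None else cell
--             for i, cell in enumerate(row)
--         )
--         for row in table
--     ]
-- ===== Notes on version B (the rewrite author's own statement) =====
-- stated objective: simpler
-- what changed: A rebuilds the entire table once per column (a fresh enumerate/replace pass over every row for each column); B computes each column's max pre-dot width from the original table and then rebuilds the table in a single final pass using that width list. B always emits tuple rows, while A leaves rows as the input lists when no column contains a dot; under the declared List String row type this is the same value.
import Mathlib
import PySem

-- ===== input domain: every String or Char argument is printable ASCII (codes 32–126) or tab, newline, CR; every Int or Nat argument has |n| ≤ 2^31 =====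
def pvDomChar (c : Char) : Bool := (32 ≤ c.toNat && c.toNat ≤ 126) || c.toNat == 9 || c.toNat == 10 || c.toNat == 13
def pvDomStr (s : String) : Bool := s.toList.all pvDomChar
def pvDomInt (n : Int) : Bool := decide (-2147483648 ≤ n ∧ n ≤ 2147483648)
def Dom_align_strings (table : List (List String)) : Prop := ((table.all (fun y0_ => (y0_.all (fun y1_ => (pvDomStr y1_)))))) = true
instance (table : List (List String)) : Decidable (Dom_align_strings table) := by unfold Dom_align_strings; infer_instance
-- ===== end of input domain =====

-- B replaces A's per-column whole-table rebuild by one width list plus a single rebuild pass (same values;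
-- A returns list rows instead of tuple rows when no column contains '.', invisible under the List String row type).

-- shared string helpers (both Pythons compute these identical sub-expressions):
-- `cs` right-justified with spaces to width m: Python f"{s:>{m}}" / str.rjust — exact, width counts characters
def pvRjust (m : Nat) (cs : List Char) : List Char := List.replicate (m - cs.length) ' ' ++ cs
-- len(s.split(".")[0])
def pvHeadLen (s : String) : Nat := (((PySem.Str.split? s ".").getD []).headD "").toList.length

-- ===== PORT A =====
-- def align_string(s) (closure over max_length m)
def pvAlignStringA (m : Nat) (s : String) : String :=
  match (PySem.Str.splitMax? s "." 1).getD [] with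
  | [_] => s                                      -- len(s_split) == 1
  | [p0, p1] => String.ofList (pvRjust m p0.toList ++ '.' :: p1.toList)  -- f"{s_split[0]:>{max_length}}.{s_split[1]}"
  | _ => s                                        -- unreachable: split(".", 1) yields 1 or 2 parts

-- one iteration of A's `for column in range(len(table[0]))` loop body; none = IndexError on row[column]
def pvStepA (t : List (List String)) (c : Nat) : Option (List (List String)) :=
  match t.mapM (fun row => PySem.List.pyGet? row (c : Int)) with   -- [row[column] for row in table]
  | none => none
  | some columnData =>
    match (columnData.filter (fun s => PySem.Str.isIn "." s)).map pvHeadLen with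
    | [] => some t                                -- continue
    | a :: rest =>
      let m := rest.foldl max a                   -- max([...])
      some (t.map (fun row => (PySem.List.enumerate row).map
        (fun p => if p.1 = (c : Int) then pvAlignStringA m p.2 else p.2)))

def align_strings (table : List (List String)) : Option (List (List String)) :=
  if table.length = 0 then none
  else (List.range (table.headD []).length).foldl
        (fun acc c => acc.bind (fun t => pvStepA t c)) (some table)

-- ===== PORT B =====
-- def _aligned(cell, width)
def pvAlignedB (cell : String) (w? : Option Nat) : String :=
  match w? with
  | none => cell
  | some w =>
    match (PySem.Str.splitMax? cell "." 1).getD [] with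
    | [p0, p1] => String.ofList (pvRjust w p0.toList ++ '.' :: p1.toList)  -- parts[0].rjust(width) + "." + parts[1]
    | _ => cell

-- max(widths) if widths else None, widths = [len(row[c].split(".")[0]) for row in table if "." in row[c]]
-- (row[c] is in range for every input admitted by Pre_; the .getD "" arm is never taken there)
def pvColMaxB (table : List (List String)) (c : Nat) : Option Nat :=
  match (table.filter (fun row => PySem.Str.isIn "." ((PySem.List.pyGet? row (c : Int)).getD ""))).map
        (fun row => pvHeadLen ((PySem.List.pyGet? row (c : Int)).getD "")) with
  | [] => none
  | a :: rest => some (rest.foldl max a)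

def align_strings_alt (table : List (List String)) : Option (List (List String)) :=
  if table.length = 0 then none
  else
    let ncols := (table.headD []).length
    let colMax := (List.range ncols).map (fun c => pvColMaxB table c)
    some (table.map (fun row => (PySem.List.enumerate row).map (fun p =>
      pvAlignedB p.2 (if p.1 < (ncols : Int) then (PySem.List.pyGet? colMax p.1).getD none else none))))

-- ===== PRECONDITION & SPEC =====
-- Pre_ excludes exactly the tables in which some row is shorter than the first row: there Python A
-- raises IndexError on row[column] (and Python B raises the same on row[c]).
def Pre_align_strings (table : List (List String)) : Prop :=
  ∀ row ∈ table, (table.headD []).length ≤ row.length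
instance (table : List (List String)) : Decidable (Pre_align_strings table) := by
  unfold Pre_align_strings; infer_instance

def pvWitness_align_strings : List (List String) := [["ab.c", "x"], ["a.bc", "yy.z"]]

def Spec_align_strings (table : List (List String)) (out : Option (List (List String))) : Prop := out = align_strings_alt table
instance (table : List (List String)) (out : Option (List (List String))) : Decidable (Spec_align_strings table out) := by unfold Spec_align_strings; infer_instance

-- ===== CLAIM (what is proved, stated in full; the proofs are below) =====
def Claim_equal_align_strings : Prop := ∀ (table : List (List String)), Dom_align_strings table → Pre_align_strings table → Spec_align_strings table (align_strings table)

-- ===== LEMMAS AND PROOFS =====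

-- the table after the columns [0, k) have been aligned (cells are taken from the ORIGINAL table:
-- aligning one column never changes any other column)
def pvPartial (table : List (List String)) (k : Nat) : List (List String) :=
  table.map (fun row => (PySem.List.enumerate row).map (fun p =>
    if p.1 < (k : Int) then pvAlignedB p.2 (pvColMaxB table p.1.toNat) else p.2))

theorem pv_enum_map_congr {α β : Type} (xs : List α) (s : Int) (f g : Int × α → β)
    (h : ∀ i a, s ≤ i → f (i, a) = g (i, a)) :
    (PySem.List.enumerate xs s).map f = (PySem.List.enumerate xs s).map g := by
  induction xs generalizing s with
  | nil => simp [PySem.List.enumerate]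
  | cons x xs ih =>
    rw [PySem.List.enumerate_cons]
    simp only [List.map_cons]
    rw [h s x le_rfl, ih (s + 1) (fun i a hi => h i a (by omega))]

theorem pv_enum_enum_map {α β γ : Type} (xs : List α) (s : Int) (f : Int × α → β) (g : Int × β → γ) :
    (PySem.List.enumerate ((PySem.List.enumerate xs s).map f) s).map g
      = (PySem.List.enumerate xs s).map (fun p => g (p.1, f p)) := by
  induction xs generalizing s with
  | nil => simp [PySem.List.enumerate]
  | cons x xs ih =>
    rw [PySem.List.enumerate_cons]
    simp only [List.map_cons, PySem.List.enumerate_cons]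
    rw [ih]

theorem pv_mapM_eq_some_map {α β : Type} (xs : List α) (f : α → Option β) (g : α → β)
    (h : ∀ x ∈ xs, f x = some (g x)) : xs.mapM f = some (xs.map g) := by
  induction xs with
  | nil => simp
  | cons x xs ih =>
    rw [List.mapM_cons, h x (by simp), ih (fun y hy => h y (by simp [hy]))]
    rfl

theorem pv_alignAB (m : Nat) (s : String) : pvAlignStringA m s = pvAlignedB s (some m) := by
  unfold pvAlignStringA pvAlignedB
  rcases (PySem.Str.splitMax? s "." 1).getD [] with _ | ⟨a, _ | ⟨b, _ | _⟩⟩ <;> rfl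

theorem pv_partial_zero (table : List (List String)) : pvPartial table 0 = table := by
  unfold pvPartial
  have : ∀ row : List String, (PySem.List.enumerate row 0).map (fun p : Int × String =>
      if p.1 < ((0 : Nat) : Int) then pvAlignedB p.2 (pvColMaxB table p.1.toNat) else p.2) = row := by
    intro row
    rw [pv_enum_map_congr row 0 _ (fun p => p.2) (by intro i a hi; simp; omega)]
    exact PySem.List.map_snd_enumerate row 0
  simp only [this, List.map_id']

-- the cell of pvPartial at a column ≥ k is the original cell
theorem pv_partial_get (table : List (List String)) (k c : Nat) (row : List String)
    (hkc : k ≤ c) (hc : c < row.length) :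
    PySem.List.pyGet? ((PySem.List.enumerate row 0).map (fun p : Int × String =>
        if p.1 < (k : Int) then pvAlignedB p.2 (pvColMaxB table p.1.toNat) else p.2)) (c : Int)
      = some ((PySem.List.pyGet? row (c : Int)).getD "") := by
  rw [PySem.List.pyGet?_natCast, PySem.List.pyGet?_natCast]
  rw [List.getElem?_map, PySem.List.getElem?_enumerate]
  have : row[c]? = some row[c] := List.getElem?_eq_getElem hc
  rw [this]
  simp only [Option.map_some, Option.getD_some]
  rw [if_neg (by omega)]

-- CORE: one iteration of A's loop on the partially-aligned table aligns exactly the next column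
theorem pv_stepA_partial (table : List (List String)) (k : Nat)
    (hpre : Pre_align_strings table) (hk : k < (table.headD []).length) :
    pvStepA (pvPartial table k) k = some (pvPartial table (k + 1)) := by
  have hrowlen : ∀ row ∈ table, k < row.length := fun row hr => lt_of_lt_of_le hk (hpre row hr)
  have hmapM : (pvPartial table k).mapM (fun row => PySem.List.pyGet? row (k : Int))
      = some (table.map (fun row => (PySem.List.pyGet? row (k : Int)).getD "")) := by
    unfold pvPartial
    rw [pv_mapM_eq_some_map _ _ (fun row' => (PySem.List.pyGet? row' (k : Int)).getD "")
      (by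
        intro row' hr'
        obtain ⟨row, hr, rfl⟩ := List.mem_map.mp hr'
        rw [pv_partial_get table k k row le_rfl (hrowlen row hr)]
        simp [List.getElem?_eq_getElem (hrowlen row hr)])]
    rw [List.map_map]
    apply congrArg
    apply List.map_congr_left
    intro row hr
    simp only [Function.comp]
    rw [pv_partial_get table k k row le_rfl (hrowlen row hr)]
    simp [List.getElem?_eq_getElem (hrowlen row hr)]
  simp only [pvStepA, hmapM, List.filter_map, List.map_map]
  simp only [Function.comp_def]
  rcases hW : ((table.filter (fun row => PySem.Str.isIn "." ((PySem.List.pyGet? row (k : Int)).getD ""))).map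
      (fun row => pvHeadLen ((PySem.List.pyGet? row (k : Int)).getD ""))) with _ | ⟨a, rest⟩
  · have hcol : pvColMaxB table k = none := by unfold pvColMaxB; rw [hW]
    simp only []
    apply congrArg
    unfold pvPartial
    apply List.map_congr_left
    intro row _
    apply pv_enum_map_congr
    intro i v hi
    by_cases h1 : i < (k : Int)
    · rw [if_pos h1, if_pos (by push_cast; omega)]
    · by_cases h2 : i = (k : Int)
      · subst h2
        rw [if_neg h1, if_pos (by push_cast; omega)]
        simp only [Int.toNat_natCast, hcol]
        rfl
      · rw [if_neg h1, if_neg (by push_cast; omega)]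
  · have hcol : pvColMaxB table k = some (rest.foldl max a) := by unfold pvColMaxB; rw [hW]
    simp only []
    apply congrArg
    unfold pvPartial
    rw [List.map_map]
    apply List.map_congr_left
    intro row _
    simp only [Function.comp_def]
    rw [pv_enum_enum_map]
    apply pv_enum_map_congr
    intro i v hi
    by_cases h2 : i = (k : Int)
    · subst h2
      simp only [if_neg (lt_irrefl (k : Int)), if_pos (by push_cast; omega : (k : Int) < ((k + 1 : Nat) : Int))]
      rw [pv_alignAB]
      simp only [Int.toNat_natCast, hcol]
      simp
    · by_cases h1 : i < (k : Int)
      · simp only [if_neg h2, if_pos h1, if_pos (by push_cast; omega : i < ((k + 1 : Nat) : Int))]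
      · simp only [if_neg h2, if_neg h1, if_neg (by push_cast; omega : ¬ i < ((k + 1 : Nat) : Int))]

theorem pv_loopA (table : List (List String)) (hpre : Pre_align_strings table) :
    ∀ j k, k + j = (table.headD []).length →
    (List.range' k j).foldl (fun acc c => acc.bind (fun t => pvStepA t c)) (some (pvPartial table k))
      = some (pvPartial table (table.headD []).length) := by
  intro j
  induction j with
  | zero => intro k hk; simp at hk; simp [hk]
  | succ j ih =>
    intro k hk
    rw [List.range'_succ]
    simp only [List.foldl_cons, Option.bind_some]
    rw [pv_stepA_partial table k hpre (by omega)]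
    exact ih (k + 1) (by omega)

theorem pv_alt_eq_partial (table : List (List String)) (hne : ¬ table.length = 0) :
    align_strings_alt table = some (pvPartial table (table.headD []).length) := by
  unfold align_strings_alt pvPartial
  rw [if_neg hne]
  apply congrArg
  apply List.map_congr_left
  intro row _
  apply pv_enum_map_congr
  intro i v hi
  by_cases h1 : i < ((table.headD []).length : Int)
  · rw [if_pos h1, if_pos h1]
    have hi' : i = ((i.toNat : Nat) : Int) := by omega
    have hlt : i.toNat < (table.headD []).length := by omega
    rw [hi', PySem.List.pyGet?_natCast, List.getElem?_map,
      List.getElem?_range hlt]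
    rfl
  · rw [if_neg h1, if_neg h1]
    rfl

-- ===== VERDICT (by name: the statement is the Claim_ definition above) =====
theorem align_strings_spec : Claim_equal_align_strings := by
  intro table _hdom hpre
  unfold Spec_align_strings
  unfold align_strings
  by_cases hne : table.length = 0
  · simp [hne, align_strings_alt]
  · simp only [hne, if_false]
    rw [pv_alt_eq_partial table hne]
    have h0 := pv_loopA table hpre (table.headD []).length 0 (by omega)
    rw [pv_partial_zero] at h0
    rw [List.range_eq_range']
    exact h0
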